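-- pv_equiv track=rewrite | github.com/microsoft/semanticworkbench | mcp-servers/mcp-server-filesystem-edit/mcp_server_filesystem_edit/tools/edit_adapters/markdown.py | fill_gaps_blocks
-- ===== SOURCE A (Python) =====
-- def fill_gaps_blocks(blocks: list[tuple[int, int]], text_length: int) -> list[tuple[int, int]]:
--     """Fills in the missing blocks between the given blocks from the
--     beginning of the text to the end of the text and returns those blocks
--
--     Example:
--         Input: [(11, 20), (25, 30)], length = 40
--         Output: [(0, 11), (11, 20), (20, 25), (25, 30), (30, 40)]
--     """
--     missing_blocks = []
--     last_end = 0
--     for start, end in blocks: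
--         if last_end < start:
--             missing_blocks.append((last_end, start))
--         last_end = end
--
--     if last_end < text_length:
--         missing_blocks.append((last_end, text_length))
--
--     return missing_blocks
-- ===== SOURCE B (Python) =====
-- def fill_gaps_blocks(blocks: list[tuple[int, int]], text_length: int) -> list[tuple[int, int]]:
--     prev_ends = [0] + [end for (_, end) in blocks]
--     boundaries = [start for (start, _) in blocks] + [text_length]
--     return [(p, b) for p, b in zip(prev_ends, boundaries) if p < b]
-- ===== Notes on version B (the rewrite author's own statement) =====
-- stated objective: alternative
-- what changed: Replaces the mutable last_end accumulator loop with an explicit pairing: each block's start is zipped against the preceding block's end ([0] prefix, text_length sentinel), keeping pairs with p < b.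
import Mathlib
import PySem

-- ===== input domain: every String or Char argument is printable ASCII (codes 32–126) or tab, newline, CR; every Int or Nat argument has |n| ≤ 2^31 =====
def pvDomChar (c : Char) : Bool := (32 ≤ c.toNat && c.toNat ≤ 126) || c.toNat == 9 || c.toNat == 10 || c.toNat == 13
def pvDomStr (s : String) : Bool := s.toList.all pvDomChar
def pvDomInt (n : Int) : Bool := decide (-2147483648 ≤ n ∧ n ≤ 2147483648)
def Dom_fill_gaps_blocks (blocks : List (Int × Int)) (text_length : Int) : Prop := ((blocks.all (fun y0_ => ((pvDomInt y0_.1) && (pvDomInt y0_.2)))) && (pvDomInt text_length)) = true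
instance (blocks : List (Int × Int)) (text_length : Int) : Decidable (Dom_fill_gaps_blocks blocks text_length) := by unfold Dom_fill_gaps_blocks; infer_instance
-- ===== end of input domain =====

-- B replaces A's mutable last_end accumulator with a zip of each block's start
-- against the preceding block's end (0 prefix, text_length sentinel): objective 'alternative'.

-- ===== PORT A =====
def fill_gaps_blocks (blocks : List (Int × Int)) (text_length : Int) : List (Int × Int) :=
  let st := blocks.foldl
    (fun (acc : List (Int × Int) × Int) (se : Int × Int) =>
      (if acc.2 < se.1 then acc.1 ++ [(acc.2, se.1)] else acc.1, se.2))
    ([], 0)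
  if st.2 < text_length then st.1 ++ [(st.2, text_length)] else st.1

-- ===== PORT B =====
def fill_gaps_blocks_alt (blocks : List (Int × Int)) (text_length : Int) : List (Int × Int) :=
  let prev_ends := 0 :: blocks.map Prod.snd
  let boundaries := blocks.map Prod.fst ++ [text_length]
  (prev_ends.zip boundaries).filter (fun pb => decide (pb.1 < pb.2))

-- ===== PRECONDITION & SPEC =====
def Spec_fill_gaps_blocks (blocks : List (Int × Int)) (text_length : Int) (out : List (Int × Int)) : Prop := out = fill_gaps_blocks_alt blocks text_length
instance (blocks : List (Int × Int)) (text_length : Int) (out : List (Int × Int)) : Decidable (Spec_fill_gaps_blocks blocks text_length out) := by unfold Spec_fill_gaps_blocks; infer_instance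

-- ===== CLAIM (what is proved, stated in full; the proofs are below) =====
def Claim_equal_fill_gaps_blocks : Prop := ∀ (blocks : List (Int × Int)) (text_length : Int), Dom_fill_gaps_blocks blocks text_length → Spec_fill_gaps_blocks blocks text_length (fill_gaps_blocks blocks text_length)

-- ===== LEMMAS AND PROOFS =====

theorem fill_gaps_loop_eq (blocks : List (Int × Int)) (text_length last_end : Int)
    (acc : List (Int × Int)) :
    (let st := blocks.foldl
        (fun (acc : List (Int × Int) × Int) (se : Int × Int) =>
          (if acc.2 < se.1 then acc.1 ++ [(acc.2, se.1)] else acc.1, se.2))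
        (acc, last_end)
      if st.2 < text_length then st.1 ++ [(st.2, text_length)] else st.1)
    = acc ++ ((last_end :: blocks.map Prod.snd).zip (blocks.map Prod.fst ++ [text_length])).filter
        (fun pb => decide (pb.1 < pb.2)) := by
  induction blocks generalizing last_end acc with
  | nil =>
    simp [List.zip, List.filter]
    split_ifs with h <;> simp [h]
  | cons se bs ih =>
    simp only [List.foldl_cons, List.map_cons, List.cons_append, List.zip_cons_cons,
      List.filter_cons]
    rw [ih]
    by_cases h : last_end < se.1 <;> simp [h]

theorem fill_gaps_blocks_spec_aux :
    ∀ (blocks : List (Int × Int)) (text_length : Int),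
      fill_gaps_blocks blocks text_length = fill_gaps_blocks_alt blocks text_length := by
  intro blocks text_length
  have := fill_gaps_loop_eq blocks text_length 0 []
  simpa [fill_gaps_blocks, fill_gaps_blocks_alt] using this

-- ===== VERDICT (by name: the statement is the Claim_ definition above) =====
theorem fill_gaps_blocks_spec : Claim_equal_fill_gaps_blocks := by
  intro blocks text_length _
  exact fill_gaps_blocks_spec_aux blocks text_length
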